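-- pv_equiv track=rewrite | github.com/dev0urme/ire-leads-bot | main.py | guess_tz_by_phone
-- ===== SOURCE A (Python) =====
-- COUNTRY_TZ_MAP = {
--     "34": "GMT+1",
--     "7": "GMT+3",
--     "1": "GMT-5",
-- }
--
-- def guess_tz_by_phone(phone: str) -> str:
--     if not phone.startswith("+"):
--         return "Другой"
--     digits = phone[1:]
--     for ccode in sorted(COUNTRY_TZ_MAP.keys(), key=len, reverse=True):
--         if digits.startswith(ccode):
--             return COUNTRY_TZ_MAP[ccode]
--     return "Другой"
-- ===== SOURCE B (Python) =====
-- COUNTRY_TZ_MAP = {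
--     "34": "GMT+1",
--     "7": "GMT+3",
--     "1": "GMT-5",
-- }
--
-- _MAX_CODE_LEN = max(len(code) for code in COUNTRY_TZ_MAP)
--
-- def guess_tz_by_phone(phone: str) -> str:
--     if not phone.startswith("+"):
--         return "Другой"
--     digits = phone[1:]
--     for length in range(_MAX_CODE_LEN, 0, -1):
--         tz = COUNTRY_TZ_MAP.get(digits[:length])
--         if tz is not None:
--             return tz
--     return "Другой"
-- ===== Notes on version B (the rewrite author's own statement) =====
-- stated objective: idiomatic
-- what changed: Instead of scanning all dict keys (sorted by length descending) with startswith, B generates candidate prefixes of the digits from the maximum code length down and looks each up directly in the dict.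
import Mathlib
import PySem

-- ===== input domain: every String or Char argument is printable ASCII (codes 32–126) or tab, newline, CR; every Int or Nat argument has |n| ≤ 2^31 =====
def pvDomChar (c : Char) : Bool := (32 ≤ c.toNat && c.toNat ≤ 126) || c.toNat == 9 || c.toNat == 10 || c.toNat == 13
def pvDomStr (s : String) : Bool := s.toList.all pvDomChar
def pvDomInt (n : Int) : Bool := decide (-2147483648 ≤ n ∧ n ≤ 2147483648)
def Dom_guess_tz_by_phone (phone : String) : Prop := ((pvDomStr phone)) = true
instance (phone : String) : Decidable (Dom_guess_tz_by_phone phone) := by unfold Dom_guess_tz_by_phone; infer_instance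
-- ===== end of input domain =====

-- B replaces A's startswith-scan over the sorted keys by direct dict lookups of the
-- digits' prefixes from the maximum code length down (idiomatic; same observable behaviour).

-- ===== PORT A =====
def COUNTRY_TZ_MAP : PySem.Dict String String :=
  PySem.Dict.ofList [("34", "GMT+1"), ("7", "GMT+3"), ("1", "GMT-5")]

-- the for-ccode loop; COUNTRY_TZ_MAP[ccode] cannot raise (ccode comes from the keys), so getD "" is exact
def tzScan (digits : String) : List String → String
  | [] => "Другой"
  | ccode :: rest =>
    if PySem.Str.startswith digits ccode then
      (PySem.Dict.get? COUNTRY_TZ_MAP ccode).getD ""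
    else tzScan digits rest

def guess_tz_by_phone (phone : String) : String :=
  if ¬ PySem.Str.startswith phone "+" then "Другой"
  else
    tzScan (PySem.Str.slice phone (some 1) none)
      (PySem.List.sorted (PySem.Dict.keys COUNTRY_TZ_MAP) (fun k => PySem.Str.len k) true)

-- ===== PORT B =====
-- max(len(code) for code in COUNTRY_TZ_MAP): the dict is non-empty, so max cannot raise; getD 0 is exact
def maxCodeLen : Int :=
  (PySem.List.max? ((PySem.Dict.keys COUNTRY_TZ_MAP).map (fun k => PySem.Str.len k)) (fun x => x)).getD 0

-- the for-length loop of B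
def tzByLen (digits : String) : List Int → String
  | [] => "Другой"
  | L :: rest =>
    match PySem.Dict.get? COUNTRY_TZ_MAP (PySem.Str.slice digits none (some L)) with
    | some tz => tz
    | none => tzByLen digits rest

def guess_tz_by_phone_alt (phone : String) : String :=
  if ¬ PySem.Str.startswith phone "+" then "Другой"
  else tzByLen (PySem.Str.slice phone (some 1) none) (PySem.List.pyRange maxCodeLen 0 (-1))

-- ===== PRECONDITION & SPEC =====
def Spec_guess_tz_by_phone (phone : String) (out : String) : Prop := out = guess_tz_by_phone_alt phone
instance (phone : String) (out : String) : Decidable (Spec_guess_tz_by_phone phone out) := by unfold Spec_guess_tz_by_phone; infer_instance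

-- ===== CLAIM (what is proved, stated in full; the proofs are below) =====
def Claim_equal_guess_tz_by_phone : Prop := ∀ (phone : String), Dom_guess_tz_by_phone phone → Spec_guess_tz_by_phone phone (guess_tz_by_phone phone)

-- ===== LEMMAS AND PROOFS =====

theorem sorted_keys_eval :
    PySem.List.sorted (PySem.Dict.keys COUNTRY_TZ_MAP) (fun k => PySem.Str.len k) true
      = ["34", "7", "1"] := by rfl

theorem range_eval : PySem.List.pyRange maxCodeLen 0 (-1) = [2, 1] := by rfl

theorem core (digits : String) :
    tzScan digits ["34", "7", "1"] = tzByLen digits [2, 1] := by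
  have hM : COUNTRY_TZ_MAP
      = PySem.Dict.mk [("34", "GMT+1"), ("7", "GMT+3"), ("1", "GMT-5")] := rfl
  have h2 : PySem.Chars.slice digits.toList none (some 2) = List.take 2 digits.toList :=
    PySem.List.slice_to _ (by norm_num)
  have h1 : PySem.Chars.slice digits.toList none (some 1) = List.take 1 digits.toList :=
    PySem.List.slice_to _ (by norm_num)
  simp only [tzScan, tzByLen, hM, PySem.Dict.get?_mk_cons, PySem.Str.startswith_eq,
    beq_iff_eq, String.ext_iff, PySem.Str.toList_slice, h2, h1, PySem.Chars.startswith_iff]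
  have hE : ∀ s : String, (PySem.Dict.mk ([] : List (String × String))).get? s = none := fun _ => rfl
  simp only [hE]
  generalize digits.toList = ds
  match ds with
  | [] => simp
  | [c] =>
    by_cases h7 : c = '7' <;> by_cases h1c : c = '1' <;>
      (simp_all [List.cons_prefix_cons, List.take_succ_cons]; try (split_ifs <;> simp_all))
  | c :: d :: t =>
    by_cases h3 : c = '3' <;> by_cases h4 : d = '4' <;> by_cases h7 : c = '7' <;> by_cases h1c : c = '1' <;>
      (simp_all [List.cons_prefix_cons, List.take_succ_cons]; try (split_ifs <;> simp_all))

-- ===== VERDICT =====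
theorem guess_tz_by_phone_spec : Claim_equal_guess_tz_by_phone := by
  intro phone _
  unfold Spec_guess_tz_by_phone guess_tz_by_phone guess_tz_by_phone_alt
  rw [sorted_keys_eval, range_eval]
  split_ifs with h
  · exact core _
  · rfl
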